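-- pv_equiv track=rewrite | github.com/wyk18703232953/myResearch | codeComplex/data/filteredData/python/quadratic/python_quadratic_0546.py | stones_after
-- ===== SOURCE A (Python) =====
-- def stones_after(n, s):
--     for ch in s:
--         if ch == '-':
--             n -= 1
--         else:
--             n += 1
--         if n < 0:
--             return -1
--     return n
-- ===== SOURCE B (Python) =====
-- def stones_after(n, s):
--     # build-table-then-scan: deltas, then prefix sums, then one check
--     deltas = [-1 if ch == '-' else 1 for ch in s]
--     sums = []
--     t = n
--     for d in deltas:
--         t += d
--         sums.append(t)
--     if any(x < 0 for x in sums):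
--         return -1
--     return sums[-1] if sums else n
-- ===== Notes on version B (the rewrite author's own statement) =====
-- stated objective: alternative
-- what changed: B separates the computation into building the full list of prefix sums and then scanning it (any-negative check + last element), instead of A's fused single loop with an early return.
import Mathlib
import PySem

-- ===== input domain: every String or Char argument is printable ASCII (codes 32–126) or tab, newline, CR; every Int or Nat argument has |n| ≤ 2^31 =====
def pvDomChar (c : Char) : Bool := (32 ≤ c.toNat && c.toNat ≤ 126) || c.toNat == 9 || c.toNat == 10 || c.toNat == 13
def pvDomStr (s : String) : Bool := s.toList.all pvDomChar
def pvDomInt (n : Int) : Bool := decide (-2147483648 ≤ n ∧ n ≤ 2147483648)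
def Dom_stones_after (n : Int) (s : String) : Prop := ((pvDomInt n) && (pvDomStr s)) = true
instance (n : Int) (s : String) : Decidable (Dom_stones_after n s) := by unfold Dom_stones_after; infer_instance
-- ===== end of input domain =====

-- B builds the full list of prefix sums, then checks for a negative one and takes the last, instead of A's fused loop with early return.


-- ===== PORT A =====
-- A's fused loop with early return, as structural recursion over the characters.
def stonesLoopA : Int → List Char → Int
  | n, [] => n
  | n, ch :: rest =>
    let n' := if ch = '-' then n - 1 else n + 1
    if n' < 0 then -1 else stonesLoopA n' rest

def stones_after (n : Int) (s : String) : Int := stonesLoopA n s.toList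

-- ===== PORT B =====
-- B's prefix-sum table (the python loop appending t += d to sums).
def prefixSumsB : Int → List Int → List Int
  | _, [] => []
  | t, d :: rest => (t + d) :: prefixSumsB (t + d) rest

def stones_after_alt (n : Int) (s : String) : Int :=
  let deltas := s.toList.map (fun ch => if ch = '-' then (-1 : Int) else 1)
  let sums := prefixSumsB n deltas
  if sums.any (fun x => decide (x < 0)) then -1
  else sums.getLast?.getD n

-- ===== PRECONDITION & SPEC =====
def Spec_stones_after (n : Int) (s : String) (out : Int) : Prop := out = stones_after_alt n s
instance (n : Int) (s : String) (out : Int) : Decidable (Spec_stones_after n s out) := by unfold Spec_stones_after; infer_instance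

-- ===== CLAIM (what is proved, stated in full; the proofs are below) =====
def Claim_equal_stones_after : Prop := ∀ (n : Int) (s : String), Dom_stones_after n s → Spec_stones_after n s (stones_after n s)

-- ===== LEMMAS AND PROOFS =====
-- core: A's loop equals B's table-then-scan, for every char list and start value
theorem stones_core (cs : List Char) : ∀ (n : Int),
    stonesLoopA n cs =
      (let sums := prefixSumsB n (cs.map (fun ch => if ch = '-' then (-1 : Int) else 1));
       if sums.any (fun x => decide (x < 0)) then -1 else sums.getLast?.getD n) := by
  induction cs with
  | nil => intro n; simp [stonesLoopA, prefixSumsB]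
  | cons ch rest ih =>
    intro n
    have hd : (if ch = '-' then n - 1 else n + 1) = n + (if ch = '-' then (-1 : Int) else 1) := by
      split <;> ring
    simp only [stonesLoopA, List.map_cons, prefixSumsB, List.any_cons, hd]
    set n' := n + (if ch = '-' then (-1 : Int) else 1) with hn'
    by_cases h : n' < 0
    · simp [h]
    · have := ih n'
      simp only [h, decide_false, Bool.false_or]
      rw [this]
      cases hrest : prefixSumsB n' (rest.map (fun ch => if ch = '-' then (-1 : Int) else 1)) with
      | nil => simp
      | cons a l =>
        by_cases hany : (a :: l).any (fun x => decide (x < 0)) = true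
        · simp [hany]
        · simp only [hany, Bool.false_eq_true, if_false]
          simp [List.getLast?_cons]

-- ===== VERDICT (by name: the statement is the Claim_ definition above) =====
theorem stones_after_spec : Claim_equal_stones_after := by
  intro n s _
  unfold Spec_stones_after stones_after stones_after_alt
  exact stones_core s.toList n
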